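-- pv_equiv track=rewrite | github.com/ferranestany02/practicas | Carrera.py | vuelta_rapida_veh
-- ===== SOURCE A (Python) =====
-- def vuelta_rapida_veh(carr, d):
--     tant = 0  # tiempo de inicio de la primera vuelta
--     v = 0  # numero de vuelta
--     volta = 0  # numero de vuelta rápida
--     for c in carr:  # recorremos toda la secuencia
--         if c[0] == d:  # si el dorsal coincide, vemos tiempo.
--             v += 1  # aumentamos vuelta
--             if v == 1:  # caso particular la primera vuelta.
--                 tmv = c[1]  # tiempo de la primera vuelta
--                 volta = 1  # asumimos que la primera vuelta es la rápida
--                 tant = c[1]  # guardamos tiempo para cálculo siguiente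
--             else:
--                 tdif = c[1] - tant  # cálculo del siguiente tiempo de vuelta
--                 if tdif < tmv:  # comparamos con la mejor
--                     tmv = tdif  # asumimos nuevo tiempo
--                     volta = v  # asumimos nueva vuelta
--                 tant = c[1]  # guardamos tiempo para cálculo siguiente
--     return volta, tmv  # se retorna mejor tiempo y no. de vuelta
-- ===== SOURCE B (Python) =====
-- def vuelta_rapida_veh(carr, d):
--     times = [t for x, t in carr if x == d]
--     durs = [times[0]] + [b - a for a, b in zip(times, times[1:])]
--     best = min(durs)
--     return durs.index(best) + 1, best
-- ===== Notes on version B (the rewrite author's own statement) =====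
-- stated objective: idiomatic
-- what changed: A's single stateful loop (running lap counter, previous time, best-so-far) is replaced by a pipeline: filter the vehicle's split times, build the lap-duration list, then take min() and its first index.
import Mathlib
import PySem

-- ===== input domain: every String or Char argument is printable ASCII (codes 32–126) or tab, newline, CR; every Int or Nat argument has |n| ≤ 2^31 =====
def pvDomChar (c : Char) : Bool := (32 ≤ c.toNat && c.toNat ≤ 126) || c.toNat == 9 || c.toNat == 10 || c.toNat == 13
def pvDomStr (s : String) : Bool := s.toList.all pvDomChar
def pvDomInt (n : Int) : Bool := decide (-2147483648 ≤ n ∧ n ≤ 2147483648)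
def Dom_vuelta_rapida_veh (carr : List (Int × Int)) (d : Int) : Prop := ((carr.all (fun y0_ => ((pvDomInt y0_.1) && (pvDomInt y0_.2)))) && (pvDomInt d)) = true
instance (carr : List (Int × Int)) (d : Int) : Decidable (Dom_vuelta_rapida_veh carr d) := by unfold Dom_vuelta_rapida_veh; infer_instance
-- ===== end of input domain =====

-- B replaces A's single stateful loop by: filter the vehicle's split times, build the
-- lap-duration list, and take min / first index of min (idiomatic decomposition; no speed claim).

-- ===== PORT A =====
-- loop body of A; state = (tant, v, volta, tmv) with tmv : Option Int (none = Python's unbound tmv)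
def pvStepA (d : Int) (st : Int × Int × Int × Option Int) (c : Int × Int) : Int × Int × Int × Option Int :=
  if c.1 = d then
    let v' := st.2.1 + 1
    if v' = 1 then (c.2, v', 1, some c.2)
    else
      let tdif := c.2 - st.1
      match st.2.2.2 with
      | some tmv => if tdif < tmv then (c.2, v', v', some tdif) else (c.2, v', st.2.2.1, some tmv)
      | none => (c.2, v', st.2.2.1, none)  -- unreachable from the initial state (tmv is set once v ≥ 1)
  else st

def vuelta_rapida_veh (carr : List (Int × Int)) (d : Int) : Int × Int :=
  let st := carr.foldl (pvStepA d) (0, 0, 0, (none : Option Int))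
  (st.2.2.1, st.2.2.2.getD 0)  -- tmv unbound (no matching dorsal) → UnboundLocalError; excluded by Pre_

-- ===== PORT B =====
def vuelta_rapida_veh_alt (carr : List (Int × Int)) (d : Int) : Int × Int :=
  let times := carr.filterMap (fun c => if c.1 = d then some c.2 else none)
  match times with
  | [] => (0, 0)  -- Python: times[0] raises IndexError; excluded by Pre_
  | t0 :: _ =>
    let durs := t0 :: ((times.zip times.tail).map (fun p => p.2 - p.1))
    match PySem.List.min? durs (fun x => x) with
    | some best => (((PySem.List.index? durs best).getD 0 : Int) + 1, best)
    | none => (0, 0)  -- unreachable: durs is nonempty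

-- ===== PRECONDITION & SPEC =====
-- Pre_ excludes inputs with no entry for dorsal d: there A raises UnboundLocalError (tmv unbound)
-- and B raises IndexError (times[0]); neither returns a value.
def Pre_vuelta_rapida_veh (carr : List (Int × Int)) (d : Int) : Prop := ∃ c ∈ carr, c.1 = d
instance (carr : List (Int × Int)) (d : Int) : Decidable (Pre_vuelta_rapida_veh carr d) := by unfold Pre_vuelta_rapida_veh; infer_instance
def pvWitness_vuelta_rapida_veh : (List (Int × Int)) × Int := ([(1, 5), (2, 7), (1, 9)], 1)

def Spec_vuelta_rapida_veh (carr : List (Int × Int)) (d : Int) (out : Int × Int) : Prop := out = vuelta_rapida_veh_alt carr d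
instance (carr : List (Int × Int)) (d : Int) (out : Int × Int) : Decidable (Spec_vuelta_rapida_veh carr d out) := by unfold Spec_vuelta_rapida_veh; infer_instance

-- ===== CLAIM (what is proved, stated in full; the proofs are below) =====
def Claim_equal_vuelta_rapida_veh : Prop := ∀ (carr : List (Int × Int)) (d : Int), Dom_vuelta_rapida_veh carr d → Pre_vuelta_rapida_veh carr d → Spec_vuelta_rapida_veh carr d (vuelta_rapida_veh carr d)

-- ===== LEMMAS AND PROOFS =====

-- A's loop body restricted to a matching entry (only its time matters)
def pvG (st : Int × Int × Int × Option Int) (t : Int) : Int × Int × Int × Option Int :=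
  let v' := st.2.1 + 1
  if v' = 1 then (t, v', 1, some t)
  else
    let tdif := t - st.1
    match st.2.2.2 with
    | some tmv => if tdif < tmv then (t, v', v', some tdif) else (t, v', st.2.2.1, some tmv)
    | none => (t, v', st.2.2.1, none)

-- consecutive differences with a running previous value
def pvDiffs (p : Int) : List Int → List Int
  | [] => []
  | x :: xs => (x - p) :: pvDiffs x xs

def pvLastD (p : Int) : List Int → Int
  | [] => p
  | x :: xs => pvLastD x xs

def pvBestOf (ds : List Int) : Int × Int :=
  match PySem.List.min? ds (fun x => x) with
  | some best => (((PySem.List.index? ds best).getD 0 : Int) + 1, best)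
  | none => (0, 0)

lemma pvFoldFilt (d : Int) (carr : List (Int × Int)) (st : Int × Int × Int × Option Int) :
    carr.foldl (pvStepA d) st
      = (carr.filterMap (fun c => if c.1 = d then some c.2 else none)).foldl pvG st := by
  induction carr generalizing st with
  | nil => rfl
  | cons c rest ih =>
    by_cases h : c.1 = d
    · simp [List.foldl, h, pvStepA, pvG, ih]
    · simp [List.foldl, h, pvStepA, ih]

lemma pvZipDiffs (t0 : Int) (rest : List Int) :
    (((t0 :: rest).zip (t0 :: rest).tail).map (fun p => p.2 - p.1)) = pvDiffs t0 rest := by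
  induction rest generalizing t0 with
  | nil => rfl
  | cons r rs ih => simp [List.zip, pvDiffs, ← ih r]

lemma pvDiffs_append (p : Int) (l : List Int) (x : Int) :
    pvDiffs p (l ++ [x]) = pvDiffs p l ++ [x - pvLastD p l] := by
  induction l generalizing p with
  | nil => rfl
  | cons a as ih => simp [pvDiffs, pvLastD, ih]

lemma pvLastD_append (p : Int) (l : List Int) (x : Int) :
    pvLastD p (l ++ [x]) = x := by
  induction l generalizing p with
  | nil => rfl
  | cons a as ih => simp [pvLastD, ih]

lemma pvMin_append (d0 : Int) (dt : List Int) (e : Int) :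
    PySem.List.min? ((d0 :: dt) ++ [e]) (fun x => x)
      = some (min ((dt.foldl min d0)) e) := by
  rw [List.cons_append, PySem.List.min?_id_cons, List.foldl_append]
  rfl

lemma pvBestOf_append (d0 : Int) (dt : List Int) (e : Int) :
    pvBestOf ((d0 :: dt) ++ [e])
      = if e < (pvBestOf (d0 :: dt)).2 then (((d0 :: dt).length : Int) + 1, e)
        else pvBestOf (d0 :: dt) := by
  have hmin : PySem.List.min? (d0 :: dt) (fun x => x) = some (dt.foldl min d0) :=
    PySem.List.min?_id_cons d0 dt
  set m := dt.foldl min d0 with hm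
  have hb : pvBestOf (d0 :: dt) = (((PySem.List.index? (d0 :: dt) m).getD 0 : Int) + 1, m) := by
    simp [pvBestOf, hmin]
  have hmem : m ∈ (d0 :: dt) := PySem.List.min?_mem hmin
  have hle : ∀ y ∈ (d0 :: dt), m ≤ y := by
    intro y hy; exact PySem.List.min?_isMin hmin y hy
  by_cases hlt : e < m
  · have hnotmem : e ∉ (d0 :: dt) := fun h => absurd (hle e h) (by omega)
    have hmin' : PySem.List.min? ((d0 :: dt) ++ [e]) (fun x => x) = some e := by
      rw [pvMin_append]; congr 1; omega
    have hidx : PySem.List.index? ((d0 :: dt) ++ [e]) e = some ((d0 :: dt).length) :=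
      PySem.List.index?_append_singleton_self _ _ hnotmem
    simp only [pvBestOf]
    rw [hmin', hmin]
    simp only [PySem.List.index?_eq_idxOf?, List.cons_append] at hidx
    simp [hlt]
    rw [hidx]
    simp
  · have hmin' : PySem.List.min? ((d0 :: dt) ++ [e]) (fun x => x) = some m := by
      rw [pvMin_append]; congr 1; omega
    have hidx : PySem.List.index? ((d0 :: dt) ++ [e]) m = PySem.List.index? (d0 :: dt) m :=
      PySem.List.index?_append_of_mem [e] hmem
    simp only [pvBestOf]
    rw [hmin', hmin]
    simp only [PySem.List.index?_eq_idxOf?, List.cons_append] at hidx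
    simp [hlt]
    rw [hidx]

lemma pvDiffs_length (p : Int) (l : List Int) : (pvDiffs p l).length = l.length := by
  induction l generalizing p with
  | nil => rfl
  | cons a as ih => simp [pvDiffs, ih]

lemma pvCore (t0 : Int) (rest : List Int) :
    (t0 :: rest).foldl pvG (0, 0, 0, (none : Option Int))
      = (pvLastD t0 rest, ((t0 :: rest).length : Int),
         (pvBestOf (t0 :: pvDiffs t0 rest)).1, some (pvBestOf (t0 :: pvDiffs t0 rest)).2) := by
  induction rest using List.reverseRecOn with
  | nil =>
    simp [List.foldl, pvG, pvLastD, pvDiffs, pvBestOf, PySem.List.min?, PySem.List.index?]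
  | append_singleton l x ih =>
    rw [show t0 :: (l ++ [x]) = (t0 :: l) ++ [x] by rfl, List.foldl_append, ih]
    have hlast := pvLastD_append t0 l x
    have hdiffs := pvDiffs_append t0 l x
    have hbest := pvBestOf_append t0 (pvDiffs t0 l) (x - pvLastD t0 l)
    have hlen := pvDiffs_length t0 l
    have hne : ((t0 :: l).length : Int) + 1 ≠ 1 := by simp; omega
    simp only [List.foldl, pvG]
    rw [hlast, show t0 :: pvDiffs t0 (l ++ [x]) = (t0 :: pvDiffs t0 l) ++ [x - pvLastD t0 l] by
      rw [hdiffs]; rfl]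
    rw [hbest]
    have h0 : ¬((l.length : Int) + 1 = 0) := by omega
    by_cases hlt : x - pvLastD t0 l < (pvBestOf (t0 :: pvDiffs t0 l)).2
    · simp only [if_pos hlt]
      simp [h0, hlen]
    · simp only [if_neg hlt]
      simp [h0]

-- ===== VERDICT (by name: the statement is the Claim_ definition above) =====
theorem vuelta_rapida_veh_spec : Claim_equal_vuelta_rapida_veh := by
  intro carr d _ hpre
  unfold Spec_vuelta_rapida_veh vuelta_rapida_veh vuelta_rapida_veh_alt
  rw [pvFoldFilt]
  obtain ⟨c, hc, hcd⟩ := hpre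
  have hne : carr.filterMap (fun c => if c.1 = d then some c.2 else none) ≠ [] := by
    intro h
    have : c.2 ∈ carr.filterMap (fun c => if c.1 = d then some c.2 else none) := by
      rw [List.mem_filterMap]; exact ⟨c, hc, by simp [hcd]⟩
    simp [h] at this
  obtain ⟨t0, rest, hts⟩ := List.exists_cons_of_ne_nil hne
  rw [hts]
  simp only [pvCore, pvZipDiffs, pvBestOf]
  cases hmin : PySem.List.min? (t0 :: pvDiffs t0 rest) (fun x => x) with
  | none => rw [PySem.List.min?_id_cons] at hmin; cases hmin
  | some m => simp
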